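-- pv_equiv track=rewrite | github.com/csoeder/Human-Denovo-Polymorphs | scripts/accumulation_clumper.py | scan_for_intersects
-- ===== SOURCE A (Python) =====
-- def scan_for_intersects(clust_in):
-- 	dict_out = {}
-- 	for i in range(0, len(clust_in)):
-- 		dict_out[i] = []
-- 		for j in range(i+1,len(clust_in)):
-- 			if len(clust_in[i].intersection(clust_in[j])) > 0:
-- 				dict_out[i].append(j)
-- 		if len(dict_out[i])==0:
-- 			dict_out.pop(i)
-- 	return(dict_out)
-- ===== SOURCE B (Python) =====
-- def scan_for_intersects(clust_in):
--     # inverted index: element -> list of cluster indices containing it (increasing)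
--     idx = {}
--     for i, c in enumerate(clust_in):
--         for x in c:
--             idx.setdefault(x, []).append(i)
--     # clusters sharing an element: each occurrence list contributes its ordered pairs
--     nbrs = {}
--     for occ in idx.values():
--         for k in range(len(occ) - 1):
--             nbrs.setdefault(occ[k], set()).update(occ[k + 1:])
--     out = {}
--     for i in range(len(clust_in)):
--         js = nbrs.get(i)
--         if js:
--             out[i] = sorted(js)
--     return out
-- ===== Notes on version B (the rewrite author's own statement) =====
-- stated objective: faster
-- what changed: A tests every pair of clusters with a set intersection; B builds an inverted index element->list of cluster indices in one pass and derives, from each element's occurrence list, the later clusters each cluster co-occurs with, sorting each neighbour set at the end; Pre_ only requires each inner list to encode a Python set (distinct elements), which every actual Python input (a list of sets) satisfies.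
import Mathlib
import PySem

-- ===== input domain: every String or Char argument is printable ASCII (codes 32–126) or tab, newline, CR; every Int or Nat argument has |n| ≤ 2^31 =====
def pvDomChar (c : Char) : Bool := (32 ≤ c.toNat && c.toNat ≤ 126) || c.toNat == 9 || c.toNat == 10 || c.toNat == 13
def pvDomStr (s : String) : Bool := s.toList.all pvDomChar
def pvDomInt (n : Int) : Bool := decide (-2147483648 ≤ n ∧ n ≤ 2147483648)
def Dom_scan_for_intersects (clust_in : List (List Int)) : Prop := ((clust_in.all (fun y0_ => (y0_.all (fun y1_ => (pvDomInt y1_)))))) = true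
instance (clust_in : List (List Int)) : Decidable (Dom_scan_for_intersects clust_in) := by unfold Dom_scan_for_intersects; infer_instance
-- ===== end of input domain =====

-- B replaces A's all-pairs O(n²·s) intersection scan by an inverted index element→clusters
-- from which the co-occurring later clusters of each cluster are derived directly (objective: faster).

-- ===== PORT A =====
def scan_for_intersects (clust_in : List (List Int)) : List (Int × List Int) :=
  ((PySem.List.pyRange 0 (clust_in.length : Int) 1).foldl (fun (dict_out : PySem.Dict Int (List Int)) i =>
    let d1 := dict_out.insert i ([] : List Int)
    let d2 := (PySem.List.pyRange (i + 1) (clust_in.length : Int) 1).foldl (fun d j =>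
      if 0 < (PySem.Set.inter (PySem.List.pyGetD clust_in i []) (PySem.List.pyGetD clust_in j [])).length
      then d.modify i [] (fun js => js ++ [j]) else d) d1
    if (d2.getD i []).length = 0 then d2.erase i else d2)
    ((PySem.Dict.empty : PySem.Dict Int (List Int)))).items

-- ===== PORT B =====
def scan_for_intersects_alt (clust_in : List (List Int)) : List (Int × List Int) :=
  -- idx: element -> increasing list of cluster indices containing it
  let idx : PySem.Dict Int (List Int) :=
    (PySem.List.enumerate clust_in 0).foldl (fun d ic =>
      ic.2.foldl (fun d x => d.modify x [] (fun occ => occ ++ [ic.1])) d) PySem.Dict.empty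
  -- nbrs: cluster index -> set of later cluster indices sharing an element
  let nbrs : PySem.Dict Int (PySem.Set Int) :=
    idx.values.foldl (fun nb occ =>
      (PySem.List.pyRange 0 ((occ.length : Int) - 1) 1).foldl (fun nb k =>
        nb.modify (PySem.List.pyGetD occ k 0) PySem.Set.empty
          (fun s => s.update (PySem.List.slice occ (some (k + 1)) none))) nb) PySem.Dict.empty
  ((PySem.List.pyRange 0 (clust_in.length : Int) 1).foldl (fun out i =>
    match nbrs.get? i with
    | some js => if js ≠ [] then out.insert i (PySem.List.sorted js (fun x => x) false) else out
    | none => out) (PySem.Dict.empty : PySem.Dict Int (List Int))).items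

-- ===== PRECONDITION & SPEC =====
-- Pre_ only requires each inner list to be a valid encoding of a Python set (distinct elements):
-- A's Python takes a list of sets, so every actual Python input satisfies it.
def Pre_scan_for_intersects (clust_in : List (List Int)) : Prop := ∀ c ∈ clust_in, c.Nodup
instance (clust_in : List (List Int)) : Decidable (Pre_scan_for_intersects clust_in) := by unfold Pre_scan_for_intersects; infer_instance

def pvWitness_scan_for_intersects : List (List Int) := [[1, 2], [2, 3], [7]]

def Spec_scan_for_intersects (clust_in : List (List Int)) (out : List (Int × List Int)) : Prop := out = scan_for_intersects_alt clust_in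
instance (clust_in : List (List Int)) (out : List (Int × List Int)) : Decidable (Spec_scan_for_intersects clust_in out) := by unfold Spec_scan_for_intersects; infer_instance

-- ===== CLAIM (what is proved, stated in full; the proofs are below) =====
def Claim_equal_scan_for_intersects : Prop := ∀ (clust_in : List (List Int)), Dom_scan_for_intersects clust_in → Pre_scan_for_intersects clust_in → Spec_scan_for_intersects clust_in (scan_for_intersects clust_in)

-- ===== LEMMAS AND PROOFS =====

-- `pvHit cs i j`: the test A performs — clusters i and j share an element.
def pvHit (cs : List (List Int)) (i j : Int) : Bool :=
  decide (0 < (PySem.Set.inter (PySem.List.pyGetD cs i []) (PySem.List.pyGetD cs j [])).length)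

def pvJs (cs : List (List Int)) (i : Int) : List Int :=
  (PySem.List.pyRange (i + 1) (cs.length : Int) 1).filter (pvHit cs i)

def pvCanon (cs : List (List Int)) : List (Int × List Int) :=
  ((PySem.List.pyRange 0 (cs.length : Int) 1).filter (fun i => !(pvJs cs i).isEmpty)).map
    (fun i => (i, pvJs cs i))

theorem pvHit_iff (cs : List (List Int)) (i j : Int) :
    pvHit cs i j = true ↔ ∃ x, x ∈ PySem.List.pyGetD cs i [] ∧ x ∈ PySem.List.pyGetD cs j [] := by
  simp [pvHit, PySem.Set.inter, List.length_pos_iff_exists_mem, List.mem_filter]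

-- ---- generic fold invariant ----
theorem pvFoldl_preserves {σ α : Type} (P : σ → Prop) (l : List α) (f : σ → α → σ) (s : σ)
    (h0 : P s) (hstep : ∀ s x, P s → P (f s x)) : P (l.foldl f s) := by
  induction l generalizing s with
  | nil => exact h0
  | cons x t ih => exact ih _ (hstep _ _ h0)

-- ---- small Dict helpers ----
theorem pvFind?_none (base : List (Int × List Int)) (i : Int) (hb : ∀ p ∈ base, p.1 ≠ i) :
    base.find? (fun p => p.1 == i) = none := by
  rw [List.find?_eq_none]
  intro p hp
  simpa using hb p hp

theorem pvGet?_mk (base : List (Int × List Int)) (i : Int) (cur : List Int)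
    (hb : ∀ p ∈ base, p.1 ≠ i) :
    (PySem.Dict.mk (base ++ [(i, cur)]) : PySem.Dict Int (List Int)).get? i = some cur := by
  simp [PySem.Dict.get?, List.find?_append, pvFind?_none base i hb]

theorem pvContains_mk (base : List (Int × List Int)) (i : Int) (cur : List Int) :
    (PySem.Dict.mk (base ++ [(i, cur)]) : PySem.Dict Int (List Int)).contains i = true := by
  simp [PySem.Dict.contains]

-- ---- A-side ----
theorem pvA_inner (cs : List (List Int)) (l : List Int) (base : List (Int × List Int))
    (i : Int) (cur : List Int) (hb : ∀ p ∈ base, p.1 ≠ i) :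
    ((l.foldl (fun d j =>
      if 0 < (PySem.Set.inter (PySem.List.pyGetD cs i []) (PySem.List.pyGetD cs j [])).length
      then d.modify i [] (fun js => js ++ [j]) else d)
      (PySem.Dict.mk (base ++ [(i, cur)]))).items)
    = base ++ [(i, cur ++ l.filter (pvHit cs i))] := by
  induction l generalizing cur with
  | nil => simp
  | cons j t ih =>
    simp only [List.foldl_cons]
    by_cases hcond : 0 < (PySem.Set.inter (PySem.List.pyGetD cs i []) (PySem.List.pyGetD cs j [])).length
    · rw [if_pos hcond]
      have hg : (PySem.Dict.mk (base ++ [(i, cur)]) : PySem.Dict Int (List Int)).getD i [] = cur := by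
        rw [PySem.Dict.getD_eq_get?_getD, pvGet?_mk base i cur hb]
        rfl
      have hX : (PySem.Dict.mk (base ++ [(i, cur)]) : PySem.Dict Int (List Int)).modify i []
          (fun js => js ++ [j]) = PySem.Dict.mk (base ++ [(i, cur ++ [j])]) := by
        rw [PySem.Dict.modify, hg, PySem.Dict.insert, if_pos (pvContains_mk base i cur)]
        congr 1
        rw [List.map_append]
        congr 1
        · have hid : ∀ p ∈ base, (if (p.1 == i) = true then (i, cur ++ [j]) else p) = id p :=
            fun p hp => by simp [hb p hp]
          exact (List.map_congr_left hid).trans (List.map_id base)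
        · simp
      rw [hX, ih (cur ++ [j])]
      have hh : pvHit cs i j = true := by simp [pvHit]; exact hcond
      -- pvHit is exactly A's test
      simp [List.filter_cons, hh, List.append_assoc]
    · rw [if_neg hcond, ih cur]
      have hh : pvHit cs i j = false := by simp [pvHit, hcond]
      simp [List.filter_cons, hh]

theorem pvA_outer (cs : List (List Int)) (l : List Int) (base : List (Int × List Int))
    (hnd : l.Nodup) (hb : ∀ i ∈ l, ∀ p ∈ base, p.1 ≠ i) :
    ((l.foldl (fun (dict_out : PySem.Dict Int (List Int)) i =>
      let d1 := dict_out.insert i ([] : List Int)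
      let d2 := (PySem.List.pyRange (i + 1) (cs.length : Int) 1).foldl (fun d j =>
        if 0 < (PySem.Set.inter (PySem.List.pyGetD cs i []) (PySem.List.pyGetD cs j [])).length
        then d.modify i [] (fun js => js ++ [j]) else d) d1
      if (d2.getD i []).length = 0 then d2.erase i else d2)
      ((PySem.Dict.mk base : PySem.Dict Int (List Int)))).items)
    = base ++ (l.filter (fun i => !(pvJs cs i).isEmpty)).map (fun i => (i, pvJs cs i)) := by
  induction l generalizing base with
  | nil => simp
  | cons i t ih =>
    have hbi : ∀ p ∈ base, p.1 ≠ i := hb i List.mem_cons_self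
    have hit : i ∉ t := (List.nodup_cons.mp hnd).1
    have hnd' : t.Nodup := (List.nodup_cons.mp hnd).2
    simp only [List.foldl_cons]
    have hd1 : (PySem.Dict.mk base : PySem.Dict Int (List Int)).insert i [] =
        PySem.Dict.mk (base ++ [(i, ([] : List Int))]) := by
      rw [PySem.Dict.insert, if_neg]
      simp only [PySem.Dict.contains, List.any_eq_true, not_exists]
      push_neg
      intro p hp
      simpa using hbi p hp
    rw [hd1]
    have hd2items := pvA_inner cs (PySem.List.pyRange (i + 1) (cs.length : Int) 1) base i [] hbi
    have hd2 : ((PySem.List.pyRange (i + 1) (cs.length : Int) 1).foldl (fun d j =>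
        if 0 < (PySem.Set.inter (PySem.List.pyGetD cs i []) (PySem.List.pyGetD cs j [])).length
        then d.modify i [] (fun js => js ++ [j]) else d)
        (PySem.Dict.mk (base ++ [(i, ([] : List Int))]))) = PySem.Dict.mk (base ++ [(i, pvJs cs i)]) := by
      have h' := hd2items
      simp only [List.nil_append] at h'
      rw [show (base ++ [(i, pvJs cs i)]) = (base ++ [(i, (PySem.List.pyRange (i + 1) (cs.length : Int) 1).filter (pvHit cs i))]) from rfl, ← h']
    rw [hd2]
    have hg : (PySem.Dict.mk (base ++ [(i, pvJs cs i)]) : PySem.Dict Int (List Int)).getD i [] = pvJs cs i := by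
      rw [PySem.Dict.getD_eq_get?_getD, pvGet?_mk base i _ hbi]
      rfl
    rw [hg]
    by_cases hjs : pvJs cs i = []
    · rw [if_pos (by simp [hjs])]
      have herase : (PySem.Dict.mk (base ++ [(i, pvJs cs i)]) : PySem.Dict Int (List Int)).erase i =
          PySem.Dict.mk base := by
        rw [PySem.Dict.erase]
        congr 1
        rw [List.filter_append]
        have h1 : base.filter (fun p => !(p.1 == i)) = base := by
          rw [List.filter_eq_self]
          intro p hp
          simpa using hbi p hp
        simp [h1]
      rw [herase, ih _ hnd' (fun i' hi' p hp => hb i' (List.mem_cons.mpr (Or.inr hi')) p hp)]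
      simp [List.filter_cons, hjs]
    · rw [if_neg (by simp [hjs])]
      have hb' : ∀ i' ∈ t, ∀ p ∈ base ++ [(i, pvJs cs i)], p.1 ≠ i' := by
        intro i' hi' p hp
        rcases List.mem_append.mp hp with h1 | h2
        · exact hb i' (List.mem_cons.mpr (Or.inr hi')) p h1
        · simp at h2
          subst h2
          intro h
          simp only [] at h
          exact hit (h ▸ hi')
      rw [ih _ hnd' hb']
      simp [List.filter_cons, hjs, List.append_assoc]

theorem pvA_eq (cs : List (List Int)) : scan_for_intersects cs = pvCanon cs := by
  unfold scan_for_intersects pvCanon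
  have h := pvA_outer cs (PySem.List.pyRange 0 (cs.length : Int) 1) []
    (PySem.List.nodup_pyRange_one 0 (cs.length : Int)) (by simp)
  simpa using h

-- ---- B-side ----
def pvOcc : List (List Int) → Int → Int → List Int
  | [], _, _ => []
  | c :: t, s, x => (if x ∈ c then [s] else []) ++ pvOcc t (s + 1) x

theorem pvOcc_mem (l : List (List Int)) (s x i : Int) :
    i ∈ pvOcc l s x ↔ ∃ k : Nat, ∃ h : k < l.length, i = s + k ∧ x ∈ l[k] := by
  induction l generalizing s with
  | nil => simp [pvOcc]
  | cons c t ih =>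
    constructor
    · intro h
      rcases List.mem_append.mp h with h1 | h2
      · refine ⟨0, by simp, ?_, ?_⟩
        · split at h1 <;> simp_all
        · split at h1 <;> simp_all
      · obtain ⟨k, hk, hik, hx⟩ := (ih (s + 1)).mp h2
        exact ⟨k + 1, by simpa using hk, by omega, by simpa using hx⟩
    · rintro ⟨k, hk, hik, hx⟩
      cases k with
      | zero =>
        apply List.mem_append.mpr; left
        simp at hx hik
        simp [hx, hik]
      | succ m =>
        apply List.mem_append.mpr; right
        exact (ih (s + 1)).mpr ⟨m, by simpa using hk, by omega, by simpa using hx⟩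

theorem pvOcc_pairwise (l : List (List Int)) (s x : Int) :
    (pvOcc l s x).Pairwise (· < ·) := by
  induction l generalizing s with
  | nil => simp [pvOcc]
  | cons c t ih =>
    have hge : ∀ i ∈ pvOcc t (s + 1) x, s < i := by
      intro i hi
      obtain ⟨k, hk, hik, -⟩ := (pvOcc_mem t (s + 1) x i).mp hi
      omega
    refine List.pairwise_append.mpr ⟨?_, ih (s + 1), ?_⟩
    · split <;> simp
    · intro a ha b hb
      have : a = s := by split at ha <;> simp_all
      subst this
      exact hge b hb

theorem pvIdx_inner (c : List Int) (hnd : c.Nodup) (d : PySem.Dict Int (List Int)) (s y : Int) :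
    (c.foldl (fun d x => d.modify x [] (fun occ => occ ++ [s])) d).get? y
    = if y ∈ c then some (d.getD y [] ++ [s]) else d.get? y := by
  induction c generalizing d with
  | nil => simp
  | cons x t ih =>
    have hx : x ∉ t := (List.nodup_cons.mp hnd).1
    have hnd' : t.Nodup := (List.nodup_cons.mp hnd).2
    simp only [List.foldl_cons]
    rw [ih hnd']
    by_cases hyt : y ∈ t
    · have hyx : y ≠ x := fun h => hx (h ▸ hyt)
      rw [if_pos hyt, if_pos (List.mem_cons.mpr (Or.inr hyt)),
        PySem.Dict.getD_modify_of_ne _ _ _ hyx]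
    · by_cases hyx : y = x
      · subst hyx
        rw [if_neg hyt, if_pos List.mem_cons_self]
        simp [PySem.Dict.modify, PySem.Dict.get?_insert_self]
      · rw [if_neg hyt, if_neg (by simp [hyx, hyt])]
        simp [PySem.Dict.modify, PySem.Dict.get?_insert_of_ne _ _ hyx]

theorem pvIdx_main (l : List (List Int)) (hl : ∀ c ∈ l, c.Nodup) (s : Int)
    (d : PySem.Dict Int (List Int)) (y : Int) :
    ((PySem.List.enumerate l s).foldl (fun d ic =>
      ic.2.foldl (fun d x => d.modify x [] (fun occ => occ ++ [ic.1])) d) d).get? y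
    = if pvOcc l s y ≠ [] then some (d.getD y [] ++ pvOcc l s y) else d.get? y := by
  induction l generalizing s d with
  | nil => simp [pvOcc, PySem.List.enumerate_nil]
  | cons c t ih =>
    have hc : c.Nodup := hl c List.mem_cons_self
    have hl' : ∀ c' ∈ t, c'.Nodup := fun c' h => hl c' (List.mem_cons.mpr (Or.inr h))
    rw [PySem.List.enumerate_cons, List.foldl_cons]
    have hinner := pvIdx_inner c hc d s y
    by_cases hyc : y ∈ c
    · have hg : (c.foldl (fun d x => d.modify x [] (fun occ => occ ++ [s])) d).get? y =
          some (d.getD y [] ++ [s]) := by rw [hinner, if_pos hyc]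
      have hD : (c.foldl (fun d x => d.modify x [] (fun occ => occ ++ [s])) d).getD y [] =
          d.getD y [] ++ [s] := by rw [PySem.Dict.getD_eq_get?_getD, hg]; rfl
      have hocc : pvOcc (c :: t) s y = [s] ++ pvOcc t (s + 1) y := by simp [pvOcc, hyc]
      rw [ih hl' (s + 1)]
      by_cases h2 : pvOcc t (s + 1) y = []
      · simp [h2, hocc, hg]
      · simp [h2, hocc, hD]
    · have hg : (c.foldl (fun d x => d.modify x [] (fun occ => occ ++ [s])) d).get? y =
          d.get? y := by rw [hinner, if_neg hyc]
      have hD : (c.foldl (fun d x => d.modify x [] (fun occ => occ ++ [s])) d).getD y [] =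
          d.getD y [] := by rw [PySem.Dict.getD_eq_get?_getD, hg, PySem.Dict.getD_eq_get?_getD]
      have hocc : pvOcc (c :: t) s y = pvOcc t (s + 1) y := by simp [pvOcc, hyc]
      rw [ih hl' (s + 1)]
      simp [hocc, hg, hD]

-- a pair occurs at positions k < l of occ
def pvPairIn (occ : List Int) (i j : Int) : Prop :=
  ∃ (k l : Nat), ∃ (hk : k < occ.length) (hl : l < occ.length), k < l ∧ occ[k] = i ∧ occ[l] = j

theorem pvPairIn_iff (occ : List Int) (hp : occ.Pairwise (· < ·)) (i j : Int) :
    pvPairIn occ i j ↔ i ∈ occ ∧ j ∈ occ ∧ i < j := by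
  have hmono := List.pairwise_iff_getElem.mp hp
  constructor
  · rintro ⟨k, l, hk, hl, hkl, rfl, rfl⟩
    exact ⟨List.getElem_mem hk, List.getElem_mem hl, hmono k l hk hl hkl⟩
  · rintro ⟨hi, hj, hij⟩
    obtain ⟨k, hk, rfl⟩ := List.mem_iff_getElem.mp hi
    obtain ⟨l, hl, rfl⟩ := List.mem_iff_getElem.mp hj
    refine ⟨k, l, hk, hl, ?_, rfl, rfl⟩
    by_contra h
    rcases Nat.lt_or_ge l k with h1 | h2
    · exact absurd (hmono l k hl hk h1) (by omega)
    · have : k = l := by omega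
      subst this; omega

def pvPairUpTo (occ : List Int) (K : Nat) (i j : Int) : Prop :=
  ∃ (k l : Nat), ∃ (hk : k < occ.length) (hl : l < occ.length), k < l ∧ k < K ∧ occ[k] = i ∧ occ[l] = j

theorem pvNbrs_upto (occ : List Int) (K : Nat) (hK : K ≤ occ.length)
    (nb : PySem.Dict Int (PySem.Set Int)) (i j : Int) :
    (j ∈ ((PySem.List.pyRange 0 (K : Int) 1).foldl (fun nb k =>
        nb.modify (PySem.List.pyGetD occ k 0) PySem.Set.empty
          (fun s => s.update (PySem.List.slice occ (some (k + 1)) none))) nb).getD i PySem.Set.empty)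
    ↔ (j ∈ nb.getD i PySem.Set.empty ∨ pvPairUpTo occ K i j) := by
  induction K generalizing nb with
  | zero =>
    rw [PySem.List.pyRange_one_eq_nil (by norm_num)]
    have h0 : ¬ pvPairUpTo occ 0 i j := by rintro ⟨k, l, hk, hl, hkl, hK0, -⟩; omega
    simp only [List.foldl_nil]
    tauto
  | succ K ih =>
    have hK' : K < occ.length := by omega
    have hcast : ((K + 1 : Nat) : Int) = (K : Int) + 1 := by push_cast; ring
    rw [hcast, PySem.List.pyRange_one_succ_right (Int.natCast_nonneg K), List.foldl_append,
      List.foldl_cons, List.foldl_nil]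
    have hget : PySem.List.pyGetD occ ((K : Nat) : Int) 0 = occ[K] := by
      rw [PySem.List.pyGetD_natCast, List.getD_eq_getElem _ _ hK']
    have hslice : PySem.List.slice occ (some ((K : Int) + 1)) none = occ.drop (K + 1) := by
      rw [show ((K : Int) + 1) = ((K + 1 : Nat) : Int) by push_cast; ring, PySem.List.slice_from_natCast]
    rw [hget, hslice, PySem.Dict.getD_modify]
    have hdrop : ∀ {j : Int}, j ∈ occ.drop (K + 1) ↔ ∃ (l : Nat), ∃ (hl : l < occ.length), K < l ∧ occ[l] = j := by
      intro j
      rw [List.mem_iff_getElem]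
      constructor
      · rintro ⟨m, hm, rfl⟩
        rw [List.getElem_drop]
        have hm' : K + 1 + m < occ.length := by
          rw [List.length_drop] at hm; omega
        exact ⟨K + 1 + m, hm', by omega, rfl⟩
      · rintro ⟨l, hl, hKl, rfl⟩
        have hm : l - (K + 1) < (occ.drop (K + 1)).length := by rw [List.length_drop]; omega
        refine ⟨l - (K + 1), hm, ?_⟩
        rw [List.getElem_drop]
        congr 1
        omega
    split
    · next h =>
      subst h
      rw [PySem.Set.mem_update, ih (by omega)]
      constructor
      · rintro ((hb' | ⟨k, l, hk, hl, hkl, hkK, hki, hlj⟩) | hd)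
        · exact Or.inl hb'
        · exact Or.inr ⟨k, l, hk, hl, hkl, by omega, hki, hlj⟩
        · obtain ⟨l, hl, hKl, hlj⟩ := hdrop.mp hd
          exact Or.inr ⟨K, l, hK', hl, hKl, by omega, rfl, hlj⟩
      · rintro (hb' | ⟨k, l, hk, hl, hkl, hkK, hki, hlj⟩)
        · exact Or.inl (Or.inl hb')
        · by_cases hkK' : k < K
          · exact Or.inl (Or.inr ⟨k, l, hk, hl, hkl, hkK', hki, hlj⟩)
          · have hkeq : k = K := by omega
            subst hkeq
            exact Or.inr (hdrop.mpr ⟨l, hl, by omega, hlj⟩)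
    · next h =>
      rw [ih (by omega)]
      constructor
      · rintro (hb' | ⟨k, l, hk, hl, hkl, hkK, hki, hlj⟩)
        · exact Or.inl hb'
        · exact Or.inr ⟨k, l, hk, hl, hkl, by omega, hki, hlj⟩
      · rintro (hb' | ⟨k, l, hk, hl, hkl, hkK, hki, hlj⟩)
        · exact Or.inl hb'
        · by_cases hkK' : k < K
          · exact Or.inr ⟨k, l, hk, hl, hkl, hkK', hki, hlj⟩
          · have hkeq : k = K := by omega
            subst hkeq
            exact absurd hki.symm (by simpa using h)
      -- (the k = K case contradicts i ≠ occ[K])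

theorem pvNbrs_inner (occ : List Int) (nb : PySem.Dict Int (PySem.Set Int)) (i j : Int) :
    (j ∈ ((PySem.List.pyRange 0 ((occ.length : Int) - 1) 1).foldl (fun nb k =>
        nb.modify (PySem.List.pyGetD occ k 0) PySem.Set.empty
          (fun s => s.update (PySem.List.slice occ (some (k + 1)) none))) nb).getD i PySem.Set.empty)
    ↔ (j ∈ nb.getD i PySem.Set.empty ∨ pvPairIn occ i j) := by
  by_cases h0 : occ = []
  · subst h0
    rw [show ((([] : List Int).length : Int) - 1) = -1 by simp, PySem.List.pyRange_one_eq_nil (by norm_num)]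
    have hno : ¬ pvPairIn [] i j := by rintro ⟨k, l, hk, -⟩; simp at hk
    simp only [List.foldl_nil]
    tauto
  · have hlen : 1 ≤ occ.length := by
      cases occ with
      | nil => exact absurd rfl h0
      | cons a t => simp
    rw [show ((occ.length : Int) - 1) = ((occ.length - 1 : Nat) : Int) by push_cast [hlen]; omega,
      pvNbrs_upto occ (occ.length - 1) (by omega) nb i j]
    refine or_congr Iff.rfl ⟨?_, ?_⟩
    · rintro ⟨k, l, hk, hl, hkl, -, hki, hlj⟩
      exact ⟨k, l, hk, hl, hkl, hki, hlj⟩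
    · rintro ⟨k, l, hk, hl, hkl, hki, hlj⟩
      exact ⟨k, l, hk, hl, hkl, by omega, hki, hlj⟩

theorem pvNbrs_main (vals : List (List Int)) (nb : PySem.Dict Int (PySem.Set Int)) (i j : Int) :
    (j ∈ (vals.foldl (fun nb occ =>
      (PySem.List.pyRange 0 ((occ.length : Int) - 1) 1).foldl (fun nb k =>
        nb.modify (PySem.List.pyGetD occ k 0) PySem.Set.empty
          (fun s => s.update (PySem.List.slice occ (some (k + 1)) none))) nb) nb).getD i PySem.Set.empty)
    ↔ (j ∈ nb.getD i PySem.Set.empty ∨ ∃ occ ∈ vals, pvPairIn occ i j) := by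
  induction vals generalizing nb with
  | nil => simp
  | cons occ vs ih =>
    simp only [List.foldl_cons]
    rw [ih, pvNbrs_inner occ nb i j]
    constructor
    · rintro ((h | h) | ⟨o, ho, hp⟩)
      · exact Or.inl h
      · exact Or.inr ⟨occ, List.mem_cons_self, h⟩
      · exact Or.inr ⟨o, List.mem_cons.mpr (Or.inr ho), hp⟩
    · rintro (h | ⟨o, ho, hp⟩)
      · exact Or.inl (Or.inl h)
      · rcases List.mem_cons.mp ho with rfl | ho'
        · exact Or.inl (Or.inr hp)
        · exact Or.inr ⟨o, ho', hp⟩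

theorem pvIdx_get (cs : List (List Int)) (hpre : ∀ c ∈ cs, c.Nodup) (y : Int) :
    ((PySem.List.enumerate cs 0).foldl (fun d ic =>
      ic.2.foldl (fun d x => d.modify x [] (fun occ => occ ++ [ic.1])) d)
      (PySem.Dict.empty : PySem.Dict Int (List Int))).get? y
    = if pvOcc cs 0 y ≠ [] then some (pvOcc cs 0 y) else none := by
  rw [pvIdx_main cs hpre 0 PySem.Dict.empty y]
  split <;> rfl

theorem pvIdx_keys (cs : List (List Int)) :
    ((PySem.List.enumerate cs 0).foldl (fun d ic =>
      ic.2.foldl (fun d x => d.modify x [] (fun occ => occ ++ [ic.1])) d)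
      (PySem.Dict.empty : PySem.Dict Int (List Int))).keys.Nodup := by
  apply pvFoldl_preserves (P := fun d : PySem.Dict Int (List Int) => d.keys.Nodup)
  · simp [PySem.Dict.keys, PySem.Dict.empty]
  · intro d ic h
    apply pvFoldl_preserves (P := fun d : PySem.Dict Int (List Int) => d.keys.Nodup) _ _ _ h
    intro d' x h'
    exact PySem.Dict.nodup_keys_insert _ _ _ h'

theorem pvInsert_fresh (base : List (Int × List Int)) (i : Int) (v : List Int)
    (hb : ∀ p ∈ base, p.1 ≠ i) :
    (PySem.Dict.mk base : PySem.Dict Int (List Int)).insert i v = PySem.Dict.mk (base ++ [(i, v)]) := by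
  rw [PySem.Dict.insert, if_neg]
  simp only [PySem.Dict.contains, List.any_eq_true]
  push_neg
  intro p hp
  simpa using hb p hp

theorem pvOut_fold (f : PySem.Dict Int (List Int) → Int → PySem.Dict Int (List Int))
    (cond : Int → Bool) (g : Int → List Int)
    (hf : ∀ out i, f out i = if cond i then out.insert i (g i) else out)
    (l : List Int) (base : List (Int × List Int)) (hnd : l.Nodup)
    (hb : ∀ i ∈ l, ∀ p ∈ base, p.1 ≠ i) :
    (l.foldl f (PySem.Dict.mk base)).items = base ++ (l.filter cond).map (fun i => (i, g i)) := by
  induction l generalizing base with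
  | nil => simp
  | cons i t ih =>
    have hbi : ∀ p ∈ base, p.1 ≠ i := hb i List.mem_cons_self
    have hit : i ∉ t := (List.nodup_cons.mp hnd).1
    have hnd' : t.Nodup := (List.nodup_cons.mp hnd).2
    rw [List.foldl_cons, hf]
    by_cases hc : cond i
    · rw [if_pos hc, pvInsert_fresh base i (g i) hbi]
      have hb' : ∀ i' ∈ t, ∀ p ∈ base ++ [(i, g i)], p.1 ≠ i' := by
        intro i' hi' p hp
        rcases List.mem_append.mp hp with h1 | h2
        · exact hb i' (List.mem_cons.mpr (Or.inr hi')) p h1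
        · simp at h2
          subst h2
          intro h
          simp only [] at h
          exact hit (h ▸ hi')
      rw [ih _ hnd' hb']
      simp [List.filter_cons, hc, List.append_assoc]
    · rw [if_neg hc, ih _ hnd' (fun i' hi' p hp => hb i' (List.mem_cons.mpr (Or.inr hi')) p hp)]
      simp [List.filter_cons, hc]

theorem pvB_eq (cs : List (List Int)) (hpre : ∀ c ∈ cs, c.Nodup) :
    scan_for_intersects_alt cs = pvCanon cs := by
  have key : ∀ (IDX : PySem.Dict Int (List Int)),
      (∀ y, IDX.get? y = if pvOcc cs 0 y ≠ [] then some (pvOcc cs 0 y) else none) →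
      IDX.keys.Nodup →
      ∀ (NBRS : PySem.Dict Int (PySem.Set Int)),
      NBRS = IDX.values.foldl (fun nb occ =>
        (PySem.List.pyRange 0 ((occ.length : Int) - 1) 1).foldl (fun nb k =>
          nb.modify (PySem.List.pyGetD occ k 0) PySem.Set.empty
            (fun s => s.update (PySem.List.slice occ (some (k + 1)) none))) nb) PySem.Dict.empty →
      ((PySem.List.pyRange 0 (cs.length : Int) 1).foldl (fun out i =>
        match NBRS.get? i with
        | some js => if js ≠ [] then out.insert i (PySem.List.sorted js (fun x => x) false) else out
        | none => out) (PySem.Dict.mk ([] : List (Int × List Int)))).items = pvCanon cs := by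
    intro IDX hget hkeys NBRS hN
    have hnodupS : ∀ i : Int, (NBRS.getD i PySem.Set.empty).Nodup := by
      rw [hN]
      apply pvFoldl_preserves (P := fun nb : PySem.Dict Int (PySem.Set Int) =>
        ∀ i : Int, (nb.getD i PySem.Set.empty).Nodup)
      · intro i
        exact List.nodup_nil
      · intro nb occ h
        apply pvFoldl_preserves (P := fun nb : PySem.Dict Int (PySem.Set Int) =>
          ∀ i : Int, (nb.getD i PySem.Set.empty).Nodup) _ _ _ h
        intro nb' k h' i
        rw [PySem.Dict.getD_modify]
        split
        · exact PySem.Set.nodup_update _ _ (h' _)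
        · exact h' i
    have hmem : ∀ i j : Int, (j ∈ NBRS.getD i PySem.Set.empty ↔ ∃ y, pvPairIn (pvOcc cs 0 y) i j) := by
      intro i j
      rw [hN, pvNbrs_main]
      have hemp : (PySem.Dict.empty : PySem.Dict Int (PySem.Set Int)).getD i PySem.Set.empty
          = ([] : List Int) := rfl
      rw [hemp]
      simp only [List.not_mem_nil, false_or]
      constructor
      · rintro ⟨occ, hocc, hpair⟩
        rw [PySem.Dict.values] at hocc
        obtain ⟨p, hp, hpeq⟩ := List.mem_map.mp hocc
        subst hpeq
        have hpin : (p.1, p.2) ∈ IDX.items := by simpa using hp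
        have hgp := PySem.Dict.get?_of_mem_items IDX hpin hkeys
        rw [hget p.1] at hgp
        by_cases hocc0 : pvOcc cs 0 p.1 ≠ []
        · rw [if_pos hocc0] at hgp
          have hocceq : p.2 = pvOcc cs 0 p.1 := (Option.some.inj hgp).symm
          rw [hocceq] at hpair
          exact ⟨p.1, hpair⟩
        · rw [if_neg hocc0] at hgp
          exact absurd hgp (by simp)
      · rintro ⟨y, hpair⟩
        have hne : pvOcc cs 0 y ≠ [] := by
          obtain ⟨k, l, hk, -⟩ := hpair
          intro hnil
          rw [hnil] at hk
          simp at hk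
        have hgy : IDX.get? y = some (pvOcc cs 0 y) := by rw [hget y, if_pos hne]
        obtain ⟨p, hfind, hp2⟩ : ∃ p, IDX.items.find? (fun p => p.1 == y) = some p ∧
            p.2 = pvOcc cs 0 y := by
          simpa [PySem.Dict.get?, Option.map_eq_some_iff] using hgy
        refine ⟨pvOcc cs 0 y, ?_, hpair⟩
        rw [PySem.Dict.values]
        exact List.mem_map.mpr ⟨p, List.mem_of_find?_eq_some hfind, hp2⟩
    have hmemJ : ∀ i j : Int, 0 ≤ i → (j ∈ NBRS.getD i PySem.Set.empty ↔ j ∈ pvJs cs i) := by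
      intro i j hi0
      rw [hmem i j, pvJs, List.mem_filter, PySem.List.mem_pyRange_one, pvHit_iff]
      constructor
      · rintro ⟨y, hpair⟩
        rw [pvPairIn_iff _ (pvOcc_pairwise cs 0 y)] at hpair
        obtain ⟨hiO, hjO, hij⟩ := hpair
        obtain ⟨k, hk, hik, hyk⟩ := (pvOcc_mem cs 0 y i).mp hiO
        obtain ⟨l, hl, hjl, hyl⟩ := (pvOcc_mem cs 0 y j).mp hjO
        refine ⟨⟨by omega, by omega⟩, y, ?_, ?_⟩
        · rw [show i = ((k : Nat) : Int) by omega, PySem.List.pyGetD_natCast,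
            List.getD_eq_getElem _ _ hk]
          exact hyk
        · rw [show j = ((l : Nat) : Int) by omega, PySem.List.pyGetD_natCast,
            List.getD_eq_getElem _ _ hl]
          exact hyl
      · rintro ⟨⟨hj1, hj2⟩, y, hyi, hyj⟩
        have hj0 : (0 : Int) ≤ j := by omega
        rw [PySem.List.pyGetD_of_nonneg _ _ hi0] at hyi
        rw [PySem.List.pyGetD_of_nonneg _ _ hj0] at hyj
        have hlti : i.toNat < cs.length := by
          by_contra hge
          push_neg at hge
          rw [List.getD_eq_default _ _ (by omega)] at hyi
          simp at hyi
        have hltj : j.toNat < cs.length := by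
          by_contra hge
          push_neg at hge
          rw [List.getD_eq_default _ _ (by omega)] at hyj
          simp at hyj
        rw [List.getD_eq_getElem _ _ hlti] at hyi
        rw [List.getD_eq_getElem _ _ hltj] at hyj
        refine ⟨y, (pvPairIn_iff _ (pvOcc_pairwise cs 0 y) i j).mpr ⟨?_, ?_, by omega⟩⟩
        · exact (pvOcc_mem cs 0 y i).mpr ⟨i.toNat, hlti, by omega, hyi⟩
        · exact (pvOcc_mem cs 0 y j).mpr ⟨j.toNat, hltj, by omega, hyj⟩
    refine (pvOut_fold _ (fun i => !(NBRS.getD i PySem.Set.empty).isEmpty)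
      (fun i => PySem.List.sorted (NBRS.getD i PySem.Set.empty) (fun x => x) false) ?_ _ []
      (PySem.List.nodup_pyRange_one 0 (cs.length : Int)) (by simp)).trans ?_
    · intro out i
      cases hgi : NBRS.get? i with
      | none =>
        have hD : NBRS.getD i ([] : PySem.Set Int) = [] := by
          rw [PySem.Dict.getD_eq_get?_getD, hgi]
          rfl
        simp [hgi, hD]
      | some js =>
        have hD : NBRS.getD i ([] : PySem.Set Int) = js := by
          rw [PySem.Dict.getD_eq_get?_getD, hgi]
          rfl
        cases js with
        | nil => simp [hgi, hD]
        | cons a t => simp [hgi, hD]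
    · rw [List.nil_append]
      unfold pvCanon
      have hcnd : ∀ i ∈ PySem.List.pyRange 0 (cs.length : Int) 1,
          (!(NBRS.getD i PySem.Set.empty).isEmpty) = (!(pvJs cs i).isEmpty) := by
        intro i hi
        have hi0 : (0 : Int) ≤ i := (PySem.List.mem_pyRange_one.mp hi).1
        have hiff : NBRS.getD i PySem.Set.empty = [] ↔ pvJs cs i = [] := by
          simp only [List.eq_nil_iff_forall_not_mem]
          constructor
          · intro h j hj
            exact h j ((hmemJ i j hi0).mpr hj)
          · intro h j hj
            exact h j ((hmemJ i j hi0).mp hj)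
        by_cases h1 : pvJs cs i = []
        · rw [hiff.mpr h1, h1]
        · have h2 : NBRS.getD i PySem.Set.empty ≠ [] := fun hh => h1 (hiff.mp hh)
          cases hA : NBRS.getD i PySem.Set.empty with
          | nil => exact absurd hA h2
          | cons a t =>
            cases hB : pvJs cs i with
            | nil => exact absurd hB h1
            | cons b u => rfl
      rw [List.filter_congr hcnd]
      apply List.map_congr_left
      intro i hi
      have hi0 : (0 : Int) ≤ i := (PySem.List.mem_pyRange_one.mp (List.mem_of_mem_filter hi)).1
      have hpairJ : (pvJs cs i).Pairwise (· < ·) :=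
        List.Pairwise.filter _ (PySem.List.pairwise_lt_pyRange_one (i + 1) (cs.length : Int))
      have hndJ : (pvJs cs i).Nodup := hpairJ.imp (fun h => ne_of_lt h)
      have hperm : (pvJs cs i).Perm (NBRS.getD i PySem.Set.empty) :=
        (List.perm_ext_iff_of_nodup hndJ (hnodupS i)).mpr (fun j => ((hmemJ i j hi0).symm))
      have hs : PySem.List.sorted (NBRS.getD i PySem.Set.empty) (fun x => x) false = pvJs cs i :=
        PySem.List.sorted_eq_of_perm_of_pairwise_lt _ _ _ hperm hpairJ
      rw [hs]
  exact key _ (pvIdx_get cs hpre) (pvIdx_keys cs) _ rfl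

-- ===== VERDICT (by name: the statement is the Claim_ definition above) =====
theorem scan_for_intersects_spec : Claim_equal_scan_for_intersects := by
  intro cs _ hpre
  unfold Spec_scan_for_intersects
  rw [pvA_eq, pvB_eq cs hpre]
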